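-- pv_equiv track=rewrite | github.com/s-w3i/rl-0 | rl_launcher.py | _infer_layout_params
-- ===== SOURCE A (Python) =====
-- def _infer_layout_params(grid):
--     if not grid:
--         return None
--     rows = len(grid)
--     cols = len(grid[0]) if rows else 0
--     shelf_rows_idx = [r for r in range(rows) if "x" in grid[r]]
--     if not shelf_rows_idx:
--         return None
--     row_groups = []
--     current = [shelf_rows_idx[0]]
--     for idx in shelf_rows_idx[1:]:
--         if idx == current[-1] + 1:
--             current.append(idx)
--         else:
--             row_groups.append(current)
--             current = [idx]
--     row_groups.append(current)
--     shelf_rows = len(row_groups)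
--     lengths = [len(group) for group in row_groups]
--     counts = {}
--     for length in lengths:
--         counts[length] = counts.get(length, 0) + 1
--     column_height = max(counts.items(), key=lambda item: (item[1], item[0]))[0]
--
--     shelf_cols_idx = []
--     for c in range(cols):
--         if any(grid[r][c] == "x" for r in range(rows)):
--             shelf_cols_idx.append(c)
--     if not shelf_cols_idx:
--         return None
--     col_groups = []
--     current = [shelf_cols_idx[0]]
--     for idx in shelf_cols_idx[1:]:
--         if idx == current[-1] + 1:
--             current.append(idx)
--         else:
--             col_groups.append(current)
--             current = [idx]
--     col_groups.append(current)
--     shelf_columns = len(col_groups)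
--     return {
--         "shelf_rows": shelf_rows,
--         "shelf_columns": shelf_columns,
--         "column_height": column_height,
--     }
-- ===== SOURCE B (Python) =====
-- def _infer_layout_params(grid):
--     if not grid:
--         return None
--     cols = len(grid[0])
--     row_has = ["x" in row for row in grid]
--     if True not in row_has:
--         return None
--     col_has = [any(row[c] == "x" for row in grid) for c in range(cols)]
--     if True not in col_has:
--         return None
--     shelf_rows = sum(1 for prev, cur in zip([False] + row_has, row_has) if cur and not prev)
--     shelf_columns = sum(1 for prev, cur in zip([False] + col_has, col_has) if cur and not prev)
--     lens = []
--     run = 0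
--     for h in row_has + [False]:
--         if h:
--             run += 1
--         elif run:
--             lens.append(run)
--             run = 0
--     column_height = max(sorted(set(lens), reverse=True), key=lens.count)
--     return {
--         "shelf_rows": shelf_rows,
--         "shelf_columns": shelf_columns,
--         "column_height": column_height,
--     }
-- ===== Notes on version B (the rewrite author's own statement) =====
-- stated objective: alternative
-- what changed: B never builds or groups index lists: it works on boolean presence arrays (row_has/col_has), counts shelves as rising edges of those arrays via a zip with the shifted array, extracts run lengths by a single scan over the booleans, and picks column_height as max over the descending sorted distinct run lengths keyed by count (first maximal = largest on ties), replacing A's two duplicated consecutive-index grouping loops and its counts dict.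
import Mathlib
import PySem

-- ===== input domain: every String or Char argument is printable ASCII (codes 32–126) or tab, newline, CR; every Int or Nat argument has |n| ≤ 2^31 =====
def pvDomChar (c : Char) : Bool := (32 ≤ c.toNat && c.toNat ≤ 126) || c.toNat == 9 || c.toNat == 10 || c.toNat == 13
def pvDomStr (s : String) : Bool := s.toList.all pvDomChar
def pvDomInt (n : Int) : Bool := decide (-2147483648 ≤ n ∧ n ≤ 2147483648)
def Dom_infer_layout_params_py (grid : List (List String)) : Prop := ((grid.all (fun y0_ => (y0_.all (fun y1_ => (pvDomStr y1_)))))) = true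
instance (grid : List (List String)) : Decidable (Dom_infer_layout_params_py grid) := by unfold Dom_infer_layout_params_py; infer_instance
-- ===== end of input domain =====

-- B works on boolean presence arrays instead of index lists: shelves are counted as rising
-- edges, run lengths come from one scan over the booleans, and column_height is a max by
-- count over the descending sorted distinct run lengths (objective: alternative).

-- ===== PORT A =====
-- the body of A's two identical 'current/groups' accumulation loops
def pvStepGroup (st : List (List Int) × List Int) (idx : Int) : List (List Int) × List Int :=
  if idx = PySem.List.pyGetD st.2 (-1) 0 + 1 then (st.1, st.2 ++ [idx])
  else (st.1 ++ [st.2], [idx])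

def infer_layout_params_py (grid : List (List String)) : Option (List (String × Int)) :=
  if grid = [] then none
  else
    let rows : Int := grid.length
    let cols : Int := if rows ≠ 0 then ((PySem.List.pyGetD grid 0 []).length : Int) else 0
    let shelf_rows_idx : List Int :=
      (PySem.List.pyRange 0 rows 1).filter (fun r => decide ("x" ∈ PySem.List.pyGetD grid r []))
    if shelf_rows_idx = [] then none
    else
      let st := (PySem.List.slice shelf_rows_idx (some 1) none).foldl pvStepGroup
                  ([], [PySem.List.pyGetD shelf_rows_idx 0 0])
      let row_groups := st.1 ++ [st.2]
      let shelf_rows : Int := (row_groups.length : Int)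
      let lengths : List Int := row_groups.map (fun g => (g.length : Int))
      let counts : PySem.Dict Int Int :=
        lengths.foldl (fun d L => d.modify L 0 (· + 1)) PySem.Dict.empty
      let column_height : Int :=
        match PySem.List.max2? counts.items (fun it => it.2) (fun it => it.1) with
        | some it => it.1
        | none => 0   -- unreachable: lengths ≠ [] here, so Python's max never sees an empty sequence
      let shelf_cols_idx : List Int :=
        (PySem.List.pyRange 0 cols 1).filter
          (fun c => (PySem.List.pyRange 0 rows 1).any
            (fun r => PySem.List.pyGetD (PySem.List.pyGetD grid r []) c "" == "x"))
      if shelf_cols_idx = [] then none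
      else
        let st2 := (PySem.List.slice shelf_cols_idx (some 1) none).foldl pvStepGroup
                    ([], [PySem.List.pyGetD shelf_cols_idx 0 0])
        let col_groups := st2.1 ++ [st2.2]
        let shelf_columns : Int := (col_groups.length : Int)
        some [("shelf_rows", shelf_rows), ("shelf_columns", shelf_columns),
              ("column_height", column_height)]

-- ===== PORT B =====
-- B's run-length scan: 'for h in hs + [False]: if h: run += 1 elif run: lens.append(run); run = 0'
def pvRunLens (hs : List Bool) : List Int :=
  ((hs ++ [false]).foldl
    (fun (st : List Int × Int) h =>
      if h then (st.1, st.2 + 1)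
      else if st.2 ≠ 0 then (st.1 ++ [st.2], 0) else st) ([], 0)).1

-- B's rising-edge count: sum(1 for prev, cur in zip([False] + hs, hs) if cur and not prev)
def pvEdgeCount (hs : List Bool) : Int :=
  (([false] ++ hs).zip hs).foldl (fun acc p => if p.2 && !p.1 then acc + 1 else acc) 0

def infer_layout_params_py_alt (grid : List (List String)) : Option (List (String × Int)) :=
  if grid = [] then none
  else
    let cols : Int := ((PySem.List.pyGetD grid 0 []).length : Int)
    let row_has : List Bool := grid.map (fun row => decide ("x" ∈ row))
    if row_has.contains true = false then none
    else
      let col_has : List Bool :=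
        (PySem.List.pyRange 0 cols 1).map
          (fun c => grid.any (fun row => PySem.List.pyGetD row c "" == "x"))
      if col_has.contains true = false then none
      else
        let lens := pvRunLens row_has
        let column_height : Int :=
          match PySem.List.max? (PySem.List.sorted (PySem.Set.ofList lens) (fun x => x) true)
                  (fun v => (lens.count v : Int)) with
          | some m => m
          | none => 0   -- unreachable: lens ≠ [] here, so Python's max never sees an empty sequence
        some [("shelf_rows", pvEdgeCount row_has),
              ("shelf_columns", pvEdgeCount col_has),
              ("column_height", column_height)]

-- ===== PRECONDITION & SPEC =====
-- Pre_ excludes ragged grids that contain an "x" cell: there A's per-column scan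
-- grid[r][c] can raise IndexError on a row shorter than the first row (and where it
-- happens to short-circuit before the short row, B's identical scan returns the same value).
def Pre_infer_layout_params_py (grid : List (List String)) : Prop :=
  (∀ row ∈ grid, "x" ∉ row) ∨ (∀ row ∈ grid, grid.headI.length ≤ row.length)
instance (grid : List (List String)) : Decidable (Pre_infer_layout_params_py grid) := by
  unfold Pre_infer_layout_params_py; infer_instance

def pvWitness_infer_layout_params_py : List (List String) := [["x", "."], [".", "x"]]

def Spec_infer_layout_params_py (grid : List (List String)) (out : Option (List (String × Int))) : Prop :=
  out = infer_layout_params_py_alt grid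
instance (grid : List (List String)) (out : Option (List (String × Int))) : Decidable (Spec_infer_layout_params_py grid out) := by
  unfold Spec_infer_layout_params_py; infer_instance

-- ===== CLAIM (what is proved, stated in full; the proofs are below) =====
def Claim_equal_infer_layout_params_py : Prop :=
  ∀ (grid : List (List String)), Dom_infer_layout_params_py grid →
    Pre_infer_layout_params_py grid →
    Spec_infer_layout_params_py grid (infer_layout_params_py grid)

-- ===== LEMMAS AND PROOFS =====

-- reference run-length list of the true-runs of a boolean array (proof-only)
def pvF : Int → List Bool → List Int
  | n, [] => if n = 0 then [] else [n]
  | n, true :: t => pvF (n + 1) t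
  | n, false :: t => (if n = 0 then [] else [n]) ++ pvF 0 t

-- reference rising-edge count (proof-only)
def pvE : Bool → List Bool → Int
  | _, [] => 0
  | prev, h :: t => (if h && !prev then 1 else 0) + pvE h t

-- positions of the true entries, starting at offset a (proof-only)
def pvPos : Int → List Bool → List Int
  | _, [] => []
  | a, h :: t => if h then a :: pvPos (a + 1) t else pvPos (a + 1) t

theorem pvRunLens_fold (hs : List Bool) : ∀ (lens : List Int) (n : Int),
    ((hs ++ [false]).foldl
      (fun (st : List Int × Int) h =>
        if h then (st.1, st.2 + 1)
        else if st.2 ≠ 0 then (st.1 ++ [st.2], 0) else st) (lens, n)).1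
      = lens ++ pvF n hs := by
  induction hs with
  | nil =>
      intro lens n
      by_cases hn : n = 0 <;> simp [pvF, hn]
  | cons h t ih =>
      intro lens n
      cases h with
      | true => simpa [pvF] using ih lens (n + 1)
      | false =>
          by_cases hn : n = 0
          · simpa [pvF, hn] using ih lens 0
          · simpa [pvF, hn] using ih (lens ++ [n]) 0

theorem pvRunLens_eq (hs : List Bool) : pvRunLens hs = pvF 0 hs := by
  simpa [pvRunLens] using pvRunLens_fold hs [] 0

theorem pvEdge_fold (hs : List Bool) : ∀ (prev : Bool) (acc : Int),
    ((prev :: hs).zip hs).foldl (fun acc p => if p.2 && !p.1 then acc + 1 else acc) acc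
      = acc + pvE prev hs := by
  induction hs with
  | nil => intro prev acc; simp [pvE]
  | cons h t ih =>
      intro prev acc
      simp only [List.zip_cons_cons, List.foldl_cons, pvE]
      by_cases hc : (h && !prev) = true
      · rw [if_pos hc, ih h (acc + 1), if_pos hc]; ring
      · rw [if_neg hc, ih h acc, if_neg hc]; ring

theorem pvEdgeCount_eq (hs : List Bool) : pvEdgeCount hs = pvE false hs := by
  simpa [pvEdgeCount] using pvEdge_fold hs false 0

theorem pvF_length (hs : List Bool) : ∀ (n : Int) (prev : Bool), 0 ≤ n → (n ≠ 0 ↔ prev = true) →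
    ((pvF n hs).length : Int) = pvE prev hs + (if n = 0 then 0 else 1) := by
  induction hs with
  | nil =>
      intro n prev _ _
      by_cases hn : n = 0 <;> simp [pvF, pvE, hn]
  | cons b t ih =>
      intro n prev h0 hiff
      cases b with
      | true =>
          have h1 := ih (n + 1) true (by omega) (by simp; omega)
          by_cases hn : n = 0
          · have hprev : prev = false := by
              by_contra hp
              have : prev = true := by revert hp; cases prev <;> simp
              have := hiff.mpr this; omega
            subst hprev hn
            simp only [pvF, pvE] at h1 ⊢
            simp at h1 ⊢
            omega
          · have hprev : prev = true := hiff.mp hn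
            subst hprev
            simp only [pvF, pvE] at h1 ⊢
            simp [hn] at h1 ⊢
            omega
      | false =>
          have h1 := ih 0 false (by omega) (by simp)
          by_cases hn : n = 0
          · have hprev : prev = false := by
              by_contra hp
              have : prev = true := by revert hp; cases prev <;> simp
              have := hiff.mpr this; omega
            subst hprev hn
            simp only [pvF, pvE] at h1 ⊢
            simp at h1 ⊢
            omega
          · have hprev : prev = true := hiff.mp hn
            subst hprev
            simp only [pvF, pvE] at h1 ⊢
            simp [hn] at h1 ⊢
            omega

-- A's consecutive-grouping recursion (proof-only bridge to A's fold)
def pvConsume (last : Int) (n : Int) : List Int → List Int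
  | [] => [n]
  | x :: xs => if x = last + 1 then pvConsume x (n + 1) xs else n :: pvConsume x 1 xs

theorem pvConsume_ne_nil (rest : List Int) : ∀ (last n : Int), pvConsume last n rest ≠ [] := by
  induction rest with
  | nil => intro last n; simp [pvConsume]
  | cons y ys ih =>
      intro last n
      rw [pvConsume]
      by_cases hy : y = last + 1
      · rw [if_pos hy]; exact ih y (n + 1)
      · rw [if_neg hy]; simp

theorem pvConsume_pvPos (t : List Bool) : ∀ (a n : Int), 1 ≤ n →
    (pvConsume a n (pvPos (a + 1) t) = pvF n t) ∧
    (∀ b, a + 1 < b → pvConsume a n (pvPos b t) = n :: pvF 0 t) := by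
  induction t with
  | nil =>
      intro a n hn
      constructor
      · simp [pvPos, pvConsume, pvF]; omega
      · intro b _; simp [pvPos, pvConsume, pvF]
  | cons h t ih =>
      intro a n hn
      cases h with
      | true =>
          constructor
          · rw [show pvPos (a + 1) (true :: t) = (a + 1) :: pvPos (a + 1 + 1) t from rfl]
            rw [pvConsume, if_pos rfl]
            rw [(ih (a + 1) (n + 1) (by omega)).1]
            rfl
          · intro b hb
            rw [show pvPos b (true :: t) = b :: pvPos (b + 1) t by simp [pvPos]]
            rw [pvConsume, if_neg (by omega)]
            have := (ih b 1 (by omega)).1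
            rw [this]
            rfl
      | false =>
          constructor
          · rw [show pvPos (a + 1) (false :: t) = pvPos (a + 1 + 1) t from rfl]
            rw [(ih a n hn).2 (a + 1 + 1) (by omega)]
            rw [show pvF n (false :: t) = (if n = 0 then [] else [n]) ++ pvF 0 t from rfl]
            rw [if_neg (by omega)]
            rfl
          · intro b hb
            rw [show pvPos b (false :: t) = pvPos (b + 1) t by simp [pvPos]]
            rw [(ih a n hn).2 (b + 1) (by omega)]
            rw [show pvF 0 (false :: t) = (if (0:Int) = 0 then [] else [0]) ++ pvF 0 t from rfl]
            simp

theorem pvConsume_head (t : List Bool) : ∀ (b x : Int) (xs : List Int),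
    pvPos b t = x :: xs → pvConsume x 1 xs = pvF 0 t := by
  induction t with
  | nil => intro b x xs h; simp [pvPos] at h
  | cons h t ih =>
      intro b x xs hp
      cases h with
      | true =>
          simp only [pvPos] at hp
          obtain ⟨hx, hxs⟩ := List.cons.injEq .. ▸ hp
          subst hx; subst hxs
          rw [(pvConsume_pvPos t b 1 (by omega)).1]
          rfl
      | false =>
          simp only [pvPos] at hp
          simp at hp
          rw [ih (b + 1) x xs hp]
          rfl

theorem pvPos_nil_iff (hs : List Bool) : ∀ (a : Int),
    (pvPos a hs = [] ↔ hs.contains true = false) := by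
  induction hs with
  | nil => intro a; simp [pvPos]
  | cons h t ih =>
      intro a
      cases h with
      | true => simp [pvPos]
      | false => simp [pvPos, ih (a + 1)]

theorem pvFilter_pyRange (p : Int → Bool) : ∀ (n : Nat) (a : Int),
    (PySem.List.pyRange a (a + n) 1).filter p
      = pvPos a ((PySem.List.pyRange a (a + n) 1).map p) := by
  intro n
  induction n with
  | zero =>
      intro a
      have : PySem.List.pyRange a (a + (0:Nat)) = [] := by
        simp [PySem.List.pyRange]
      rw [this]
      simp [pvPos]
  | succ m ih =>
      intro a
      have hcons : PySem.List.pyRange a (a + ((m+1:Nat):Int))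
          = a :: PySem.List.pyRange (a + 1) (a + ((m+1:Nat):Int)) := by
        exact PySem.List.pyRange_one_cons (by push_cast; omega)
      have harg : a + ((m+1:Nat):Int) = (a + 1) + (m:Int) := by push_cast; ring
      rw [hcons, harg]
      simp only [List.filter_cons, List.map_cons, pvPos]
      by_cases hp : p a = true
      · simp only [hp, if_true]
        rw [ih (a + 1)]
      · simp only [hp]
        simp only [Bool.false_eq_true, if_false]
        rw [ih (a + 1)]

theorem pvMapRange {β : Type} (xs : List β) (d : β) (p : β → Bool) :
    (PySem.List.pyRange 0 (xs.length : Int) 1).map (fun r => p (PySem.List.pyGetD xs r d))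
      = xs.map p := by
  conv_rhs => rw [← PySem.List.map_pyGetD_pyRange_zero (xs := xs) (d := d)]
  rw [List.map_map]
  rfl

theorem pvAny_range_eq {β : Type} (xs : List β) (d : β) (f : β → Bool) :
    (PySem.List.pyRange 0 (xs.length : Int) 1).any (fun r => f (PySem.List.pyGetD xs r d))
      = xs.any f := by
  conv_rhs => rw [← PySem.List.map_pyGetD_pyRange_zero (xs := xs) (d := d)]
  rw [List.any_map]
  rfl

-- lexicographic ≤ on the (k1, k2) key
def pvKeyLE {α : Type} (k1 k2 : α → Int) (a b : α) : Prop :=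
  k1 a < k1 b ∨ (k1 a = k1 b ∧ k2 a ≤ k2 b)

theorem pvMax2_inv {α : Type} (k1 k2 : α → Int) (xs : List α) : ∀ (c : α),
    ∃ m, xs.foldl (fun acc x =>
        match acc with
        | none => some x
        | some m =>
          if (decide (k1 m < k1 x) || !decide (k1 x < k1 m) && decide (k2 m < k2 x)) = true
          then some x else some m) (some c) = some m
      ∧ (m = c ∨ m ∈ xs) ∧ pvKeyLE k1 k2 c m ∧ ∀ y ∈ xs, pvKeyLE k1 k2 y m := by
  induction xs with
  | nil => intro c; exact ⟨c, rfl, Or.inl rfl, Or.inr ⟨rfl, le_refl _⟩, by simp⟩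
  | cons x xs ih =>
      intro c
      simp only [List.foldl_cons]
      by_cases hcond : (decide (k1 c < k1 x) || !decide (k1 x < k1 c) && decide (k2 c < k2 x)) = true
      · simp only [hcond, if_pos]
        obtain ⟨m, hm, hmem, hle, hall⟩ := ih x
        have hcx : pvKeyLE k1 k2 c x := by
          simp only [Bool.or_eq_true, Bool.and_eq_true, decide_eq_true_eq, Bool.not_eq_true',
            decide_eq_false_iff_not] at hcond
          unfold pvKeyLE; omega
        refine ⟨m, hm, ?_, ?_, ?_⟩
        · rcases hmem with h | h
          · exact Or.inr (h ▸ List.mem_cons_self)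
          · exact Or.inr (List.mem_cons_of_mem _ h)
        · unfold pvKeyLE at *; omega
        · intro y hy
          rcases List.mem_cons.mp hy with h | h
          · subst h; exact hle
          · exact hall y h
      · rw [if_neg hcond]
        obtain ⟨m, hm, hmem, hle, hall⟩ := ih c
        have hxc : pvKeyLE k1 k2 x c := by
          simp only [Bool.or_eq_true, Bool.and_eq_true, decide_eq_true_eq, Bool.not_eq_true',
            decide_eq_false_iff_not] at hcond
          unfold pvKeyLE; omega
        refine ⟨m, hm, ?_, hle, ?_⟩
        · rcases hmem with h | h
          · exact Or.inl h
          · exact Or.inr (List.mem_cons_of_mem _ h)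
        · intro y hy
          rcases List.mem_cons.mp hy with h | h
          · subst h; unfold pvKeyLE at *; omega
          · exact hall y h

theorem pvMax2_cons {α : Type} (k1 k2 : α → Int) (x : α) (xs : List α) :
    ∃ m, PySem.List.max2? (x :: xs) k1 k2 = some m ∧ m ∈ x :: xs
      ∧ ∀ y ∈ x :: xs, pvKeyLE k1 k2 y m := by
  obtain ⟨m, hm, hmem, hle, hall⟩ := pvMax2_inv k1 k2 xs x
  refine ⟨m, ?_, ?_, ?_⟩
  · simpa [PySem.List.max2?] using hm
  · rcases hmem with h | h
    · exact h ▸ List.mem_cons_self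
    · exact List.mem_cons_of_mem _ h
  · intro y hy
    rcases List.mem_cons.mp hy with h | h
    · subst h; exact hle
    · exact hall y h

-- A's grouping fold, projected to group lengths, is pvConsume
theorem pvFold_groups (rest : List Int) : ∀ (groups : List (List Int)) (cur : List Int)
    (h : cur ≠ []),
    (((rest.foldl pvStepGroup (groups, cur)).1 ++ [(rest.foldl pvStepGroup (groups, cur)).2]).map
        (fun g => (g.length : Int)))
      = groups.map (fun g => (g.length : Int)) ++ pvConsume (cur.getLast h) (cur.length : Int) rest := by
  induction rest with
  | nil => intro groups cur h; simp [pvConsume]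
  | cons x xs ih =>
      intro groups cur h
      simp only [List.foldl_cons]
      rw [show pvStepGroup (groups, cur) x
            = if x = cur.getLast h + 1 then (groups, cur ++ [x]) else (groups ++ [cur], [x]) by
          simp [pvStepGroup, PySem.List.pyGetD_neg_one cur 0 h]]
      by_cases hx : x = cur.getLast h + 1
      · rw [if_pos hx, ih groups (cur ++ [x]) (by simp)]
        rw [pvConsume, if_pos hx]
        simp
      · rw [if_neg hx, ih (groups ++ [cur]) [x] (by simp)]
        rw [pvConsume, if_neg hx]
        simp

-- B's max(…, key=count) over a strictly DECREASING list is the lexicographic (count, value) max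
def pvMaxStep (key : Int → Int) (acc : Option Int) (x : Int) : Option Int :=
  match acc with
  | none => some x
  | some m => if key m < key x then some x else some m

theorem pvMax?_eq_foldl (key : Int → Int) (xs : List Int) :
    PySem.List.max? xs key = xs.foldl (pvMaxStep key) none := by
  unfold PySem.List.max? pvMaxStep
  congr 1
  funext acc x
  cases acc <;> rfl

theorem pvMaxDec_inv (key : Int → Int) (xs : List Int) : ∀ (c : Int),
    xs.Pairwise (fun a b => b < a) → (∀ y ∈ xs, y < c) →
    ∃ m, xs.foldl (pvMaxStep key) (some c) = some m
      ∧ (m = c ∨ (m ∈ xs ∧ key c < key m))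
      ∧ ∀ y ∈ xs, pvKeyLE key (fun v => v) y m := by
  induction xs with
  | nil => intro c _ _; exact ⟨c, rfl, Or.inl rfl, by simp⟩
  | cons x xs ih =>
      intro c hpw hlt
      have hpw' : xs.Pairwise (fun a b => b < a) := hpw.of_cons
      have hxlt : ∀ y ∈ xs, y < x := by
        intro y hy; exact (List.pairwise_cons.mp hpw).1 y hy
      simp only [List.foldl_cons]
      by_cases hkey : key c < key x
      · rw [show pvMaxStep key (some c) x = some x by simp [pvMaxStep, hkey]]
        obtain ⟨m, hm, hmem, hall⟩ := ih x hpw' hxlt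
        refine ⟨m, hm, ?_, ?_⟩
        · rcases hmem with h | ⟨h1, h2⟩
          · exact Or.inr ⟨h ▸ List.mem_cons_self, h ▸ hkey⟩
          · exact Or.inr ⟨List.mem_cons_of_mem _ h1, lt_trans hkey h2⟩
        · intro y hy
          rcases List.mem_cons.mp hy with h | h
          · subst h
            rcases hmem with h | ⟨_, h2⟩
            · exact Or.inr ⟨by rw [h], by rw [h]⟩
            · exact Or.inl h2
          · exact hall y h
      · rw [show pvMaxStep key (some c) x = some c by simp [pvMaxStep, hkey]]
        have hxc : key x ≤ key c := le_of_not_gt hkey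
        obtain ⟨m, hm, hmem, hall⟩ := ih c hpw' (fun y hy => hlt y (List.mem_cons_of_mem _ hy))
        refine ⟨m, hm, ?_, ?_⟩
        · rcases hmem with h | ⟨h1, h2⟩
          · exact Or.inl h
          · exact Or.inr ⟨List.mem_cons_of_mem _ h1, h2⟩
        · intro y hy
          rcases List.mem_cons.mp hy with h | h
          · subst h
            rcases hmem with h | ⟨_, h2⟩
            · subst h
              rcases lt_or_eq_of_le hxc with h' | h'
              · exact Or.inl h'
              · exact Or.inr ⟨h', le_of_lt (hlt y List.mem_cons_self)⟩
            · exact Or.inl (lt_of_le_of_lt hxc h2)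
          · exact hall y h

theorem pvMaxDec (key : Int → Int) (x : Int) (t : List Int)
    (hpw : (x :: t).Pairwise (fun a b => b < a)) :
    ∃ m, PySem.List.max? (x :: t) key = some m ∧ m ∈ x :: t
      ∧ ∀ y ∈ x :: t, pvKeyLE key (fun v => v) y m := by
  obtain ⟨m, hm, hmem, hall⟩ :=
    pvMaxDec_inv key t x hpw.of_cons (fun y hy => (List.pairwise_cons.mp hpw).1 y hy)
  refine ⟨m, ?_, ?_, ?_⟩
  · rw [pvMax?_eq_foldl, List.foldl_cons]
    exact hm
  · rcases hmem with h | ⟨h1, _⟩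
    · exact h ▸ List.mem_cons_self
    · exact List.mem_cons_of_mem _ h1
  · intro y hy
    rcases List.mem_cons.mp hy with h | h
    · subst h
      rcases hmem with h | ⟨_, h2⟩
      · exact Or.inr ⟨by rw [h], by rw [h]⟩
      · exact Or.inl h2
    · exact hall y h

-- the mode: A's max over Counter items by (count, length) = B's max over sorted-descending
-- distinct lengths by count
theorem pvMode_eq (lens : List Int) (h : lens ≠ []) :
    (match PySem.List.max2? ((PySem.Set.ofList lens).map (fun k => (k, (lens.count k : Int))))
        (fun it => it.2) (fun it => it.1) with
      | some it => it.1
      | none => (0 : Int))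
    = (match PySem.List.max? (PySem.List.sorted (PySem.Set.ofList lens) (fun x => x) true)
          (fun v => (lens.count v : Int)) with
      | some m => m
      | none => 0) := by
  obtain ⟨l, ls, hl⟩ := List.exists_cons_of_ne_nil h
  subst hl
  have hset : ∃ s ss, PySem.Set.ofList (l :: ls) = s :: ss := by
    cases hs : PySem.Set.ofList (l :: ls) with
    | nil =>
        exfalso
        have := (PySem.Set.mem_ofList (l :: ls) l).mpr (by simp)
        rw [hs] at this; simp at this
    | cons s ss => exact ⟨s, ss, rfl⟩
  obtain ⟨s, ss, hs⟩ := hset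
  -- the sorted distinct list is strictly decreasing and nonempty
  have hnd : (PySem.List.sorted (PySem.Set.ofList (l :: ls)) (fun x => x) true).Nodup :=
    (PySem.List.sorted_perm (PySem.Set.ofList (l :: ls)) (fun x => x) true).nodup_iff.mpr
      (PySem.Set.nodup_ofList (l :: ls))
  have hge : (PySem.List.sorted (PySem.Set.ofList (l :: ls)) (fun x => x) true).Pairwise
      (fun a b => b ≤ a) := PySem.List.sorted_pairwise_rev _ _
  have hdec : (PySem.List.sorted (PySem.Set.ofList (l :: ls)) (fun x => x) true).Pairwise
      (fun a b => b < a) := by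
    have := hge.and hnd
    exact this.imp (fun hab => lt_of_le_of_ne hab.1 (Ne.symm hab.2))
  have hsne : ∃ y ys, PySem.List.sorted (PySem.Set.ofList (l :: ls)) (fun x => x) true = y :: ys := by
    cases hsrt : PySem.List.sorted (PySem.Set.ofList (l :: ls)) (fun x => x) true with
    | nil =>
        exfalso
        have := (PySem.List.sorted_eq_nil_iff (PySem.Set.ofList (l :: ls)) (fun x => x) true).mp hsrt
        rw [hs] at this; simp at this
    | cons y ys => exact ⟨y, ys, rfl⟩
  obtain ⟨y, ys, hsrt⟩ := hsne
  rw [hsrt] at hdec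
  rw [hsrt, hs, List.map_cons]
  obtain ⟨mA, hA, hAmem, hAall⟩ :=
    pvMax2_cons (fun it : Int × Int => it.2) (fun it => it.1)
      (s, ((l :: ls).count s : Int)) (ss.map (fun k => (k, ((l :: ls).count k : Int))))
  obtain ⟨mB, hB, hBmem, hBall⟩ :=
    pvMaxDec (fun v => ((l :: ls).count v : Int)) y ys hdec
  rw [hA, hB]
  -- mA is (k, count k) for some k ∈ lens
  have hAshape : ∃ k, k ∈ l :: ls ∧ mA = (k, ((l :: ls).count k : Int)) := by
    have hmem' : mA ∈ (s :: ss).map (fun k => (k, ((l :: ls).count k : Int))) := by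
      simpa using hAmem
    obtain ⟨k, hk, hkeq⟩ := List.mem_map.mp hmem'
    exact ⟨k, (PySem.Set.mem_ofList (l :: ls) k).mp (hs ▸ hk), hkeq.symm⟩
  obtain ⟨k, hkmem, hkeq⟩ := hAshape
  -- mB ∈ lens, and every element of lens is key-below mB
  have hBsrt : ∀ v, v ∈ l :: ls ↔ v ∈ y :: ys := by
    intro v
    rw [← hsrt, PySem.List.mem_sorted]
    exact (PySem.Set.mem_ofList (l :: ls) v).symm
  have hBmem' : mB ∈ l :: ls := (hBsrt mB).mpr hBmem
  have h1 : pvKeyLE (fun v => ((l :: ls).count v : Int)) (fun v => v) k mB :=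
    hBall k ((hBsrt k).mp hkmem)
  have h2 : pvKeyLE (fun it : Int × Int => it.2) (fun it => it.1)
      (mB, ((l :: ls).count mB : Int)) mA := by
    apply hAall
    have : mB ∈ PySem.Set.ofList (l :: ls) := (PySem.Set.mem_ofList _ _).mpr hBmem'
    rw [hs] at this
    simpa using List.mem_map_of_mem (f := fun k => (k, ((l :: ls).count k : Int))) this
  rw [hkeq] at h2 ⊢
  unfold pvKeyLE at h1 h2
  show k = mB
  simp only at h1 h2
  omega

-- ===== VERDICT (by name: the statement is the Claim_ definition above) =====
theorem infer_layout_params_py_spec : Claim_equal_infer_layout_params_py := by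
  intro grid _hdom _hpre
  unfold Spec_infer_layout_params_py infer_layout_params_py infer_layout_params_py_alt
  by_cases hg : grid = []
  · simp [hg]
  · have hrows : ((grid.length : Int) ≠ 0) := by
      intro h
      exact hg (List.length_eq_zero_iff.mp (by exact_mod_cast h))
    simp only [if_neg hg, if_pos hrows]
    have hmapr : (PySem.List.pyRange 0 (grid.length : Int) 1).map
        (fun r => decide ("x" ∈ PySem.List.pyGetD grid r []))
        = grid.map (fun row => decide ("x" ∈ row)) :=
      pvMapRange grid [] (fun row => decide ("x" ∈ row))
    have hri : (PySem.List.pyRange 0 (grid.length : Int) 1).filter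
        (fun r => decide ("x" ∈ PySem.List.pyGetD grid r []))
        = pvPos 0 (grid.map (fun row => decide ("x" ∈ row))) := by
      have h := pvFilter_pyRange (fun r => decide ("x" ∈ PySem.List.pyGetD grid r []))
        grid.length 0
      rw [zero_add] at h
      rw [h, hmapr]
    have hcolpred : (fun c => (PySem.List.pyRange 0 (grid.length : Int) 1).any
          (fun r => PySem.List.pyGetD (PySem.List.pyGetD grid r []) c "" == "x"))
        = (fun c => grid.any (fun row => PySem.List.pyGetD row c "" == "x")) := by
      funext c
      exact pvAny_range_eq grid [] (fun row => PySem.List.pyGetD row c "" == "x")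
    have hci : (PySem.List.pyRange 0 (((PySem.List.pyGetD grid 0 []).length : Nat) : Int) 1).filter
          (fun c => grid.any (fun row => PySem.List.pyGetD row c "" == "x"))
        = pvPos 0 ((PySem.List.pyRange 0 (((PySem.List.pyGetD grid 0 []).length : Nat) : Int) 1).map
            (fun c => grid.any (fun row => PySem.List.pyGetD row c "" == "x"))) := by
      have h := pvFilter_pyRange (fun c => grid.any (fun row => PySem.List.pyGetD row c "" == "x"))
        (PySem.List.pyGetD grid 0 []).length 0
      rw [zero_add] at h
      exact h
    rw [hri, hcolpred, hci]
    set rh := grid.map (fun row => decide ("x" ∈ row)) with hrhdef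
    set ch := (PySem.List.pyRange 0 (((PySem.List.pyGetD grid 0 []).length : Nat) : Int) 1).map
        (fun c => grid.any (fun row => PySem.List.pyGetD row c "" == "x")) with hchdef
    rcases hpos : pvPos 0 rh with _ | ⟨i0, irest⟩
    · have hc := (pvPos_nil_iff rh 0).mp hpos
      rw [if_pos (rfl : ([] : List Int) = []), if_pos hc]
    · have hcne : ¬(rh.contains true = false) := by
        intro hcf
        rw [(pvPos_nil_iff rh 0).mpr hcf] at hpos
        simp at hpos
      rcases hpos2 : pvPos 0 ch with _ | ⟨c0, crest⟩
      · have hc2 := (pvPos_nil_iff ch 0).mp hpos2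
        rw [if_neg (show ¬(i0 :: irest = []) by simp), if_pos (rfl : ([] : List Int) = []),
          if_neg hcne, if_pos hc2]
      · have hcne2 : ¬(ch.contains true = false) := by
          intro hcf
          rw [(pvPos_nil_iff ch 0).mpr hcf] at hpos2
          simp at hpos2
        rw [if_neg (show ¬(i0 :: irest = []) by simp), if_neg hcne,
          if_neg (show ¬(c0 :: crest = []) by simp), if_neg hcne2]
        rw [PySem.List.slice_from_one, PySem.List.slice_from_one, List.tail_cons, List.tail_cons,
          PySem.List.pyGetD_zero_cons, PySem.List.pyGetD_zero_cons]
        have hfoldR := pvFold_groups irest ([] : List (List Int)) [i0] (by simp)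
        have hfoldC := pvFold_groups crest ([] : List (List Int)) [c0] (by simp)
        simp at hfoldR hfoldC
        rw [pvConsume_head rh 0 i0 irest hpos] at hfoldR
        rw [pvConsume_head ch 0 c0 crest hpos2] at hfoldC
        simp only [List.map_append, List.map_cons, List.map_nil]
        have hlr : ((pvF 0 rh).length : Int) = pvE false rh := by
          simpa using pvF_length rh 0 false (by omega) (by simp)
        have hlc : ((pvF 0 ch).length : Int) = pvE false ch := by
          simpa using pvF_length ch 0 false (by omega) (by simp)
        have hlenR : (((List.foldl pvStepGroup ([], [i0]) irest).1
              ++ [(List.foldl pvStepGroup ([], [i0]) irest).2]).length : Int) = pvEdgeCount rh := by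
          have h := congrArg List.length hfoldR
          simp only [List.length_append, List.length_map, List.length_cons, List.length_nil] at h
          rw [pvEdgeCount_eq, ← hlr]
          simp only [List.length_append, List.length_cons, List.length_nil]
          omega
        have hlenC : (((List.foldl pvStepGroup ([], [c0]) crest).1
              ++ [(List.foldl pvStepGroup ([], [c0]) crest).2]).length : Int) = pvEdgeCount ch := by
          have h := congrArg List.length hfoldC
          simp only [List.length_append, List.length_map, List.length_cons, List.length_nil] at h
          rw [pvEdgeCount_eq, ← hlc]
          simp only [List.length_append, List.length_cons, List.length_nil]
          omega
        have hne : pvF 0 rh ≠ [] := by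
          rw [← pvConsume_head rh 0 i0 irest hpos]
          exact pvConsume_ne_nil irest i0 1
        rw [hlenR, hlenC, hfoldR, ← PySem.Dict.counter_eq_foldl, PySem.Dict.items_counter,
          pvRunLens_eq, pvMode_eq (pvF 0 rh) hne]
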